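-- pv_equiv track=rewrite | github.com/charleslien/advent-of-code | lib.py | range_intersection
-- ===== SOURCE A (Python) =====
-- from collections.abc import Iterable, Sequence
--
-- def range_intersection(ranges1: list[Sequence[int, int]], ranges2: list[Sequence[int, int]]) -> list[Sequence[int, int]]:
--   i1 = 0
--   i2 = 0
--   result = []
--   ranges1 = list(sorted(ranges1, key=lambda r: r[0]))
--   ranges2 = list(sorted(ranges2, key=lambda r: r[0]))
--   while i1 < len(ranges1) and i2 < len(ranges2):
--     r1 = ranges1[i1]
--     r2 = ranges2[i2]
--     result.append((max(r1[0], r2[0]), min(r1[1], r2[1])))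
--     if r1[1] < r2[1]:
--       i1 += 1
--     else:
--       i2 += 1
--   return range_merge(result)
--
-- def range_merge(ranges: Iterable[Sequence[int, int]]) -> list[Sequence[int, int]]:
--   result = []
--   for r in sorted(ranges, key=lambda r: r[0]):
--     if r[0] >= r[1]:
--       continue
--     if result and result[-1][1] >= r[0]:
--       result[-1] = result[-1][0], max(r[1], result[-1][1])
--       continue
--     result.append(r)
--   return result
-- ===== SOURCE B (Python) =====
-- def range_intersection(ranges1, ranges2):
--   # Coordinate sweep-line: walk consecutive boundary coordinates, keep every
--   # gap covered by both lists, and glue touching gaps together.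
--   coords = set()
--   for s, e in ranges1:
--     if s < e:
--       coords.add(s)
--       coords.add(e)
--   for s, e in ranges2:
--     if s < e:
--       coords.add(s)
--       coords.add(e)
--   xs = sorted(coords)
--   result = []
--   for x, y in zip(xs, xs[1:]):
--     if any(s <= x < e for s, e in ranges1) and any(s <= x < e for s, e in ranges2):
--       if result and result[-1][1] == x:
--         result[-1] = (result[-1][0], y)
--       else:
--         result.append((x, y))
--   return result
-- ===== Notes on version B (the rewrite author's own statement) =====
-- stated objective: alternative
-- what changed: Replaced the two-pointer pairing over the two sorted lists followed by a separate range_merge pass with a single coordinate sweep-line: sort the distinct interval boundaries, test each consecutive gap for coverage by both lists, and coalesce touching gaps on the fly.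
import Mathlib
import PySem

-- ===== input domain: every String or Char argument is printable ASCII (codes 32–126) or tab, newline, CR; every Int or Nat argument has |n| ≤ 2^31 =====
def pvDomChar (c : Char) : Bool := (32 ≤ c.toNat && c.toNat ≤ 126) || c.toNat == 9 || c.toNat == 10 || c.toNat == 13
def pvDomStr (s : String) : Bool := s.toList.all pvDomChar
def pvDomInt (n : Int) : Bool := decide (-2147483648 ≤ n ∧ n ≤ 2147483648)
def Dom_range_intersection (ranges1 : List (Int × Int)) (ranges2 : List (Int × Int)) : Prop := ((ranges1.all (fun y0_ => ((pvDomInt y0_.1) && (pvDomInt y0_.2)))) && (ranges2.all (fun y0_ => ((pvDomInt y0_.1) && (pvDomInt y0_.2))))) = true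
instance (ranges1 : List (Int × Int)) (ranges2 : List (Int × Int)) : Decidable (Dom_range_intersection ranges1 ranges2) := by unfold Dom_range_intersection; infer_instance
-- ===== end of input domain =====

-- B replaces A's two-pointer pairing + separate range_merge pass by a single
-- boundary-coordinate sweep that keeps gaps covered by both lists (alternative
-- algorithm, similar cost; equivalence of the RETURN value is what is proved).

-- ===== PORT A =====
-- the while-loop of range_merge's for-loop, accumulator held reversed (result[-1] = head)
def rmLoop : List (Int × Int) → List (Int × Int) → List (Int × Int)
  | acc, [] => acc.reverse
  | acc, r :: rest =>
    if r.1 ≥ r.2 then rmLoop acc rest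
    else
      match acc with
      | last :: accT =>
        if last.2 ≥ r.1 then rmLoop ((last.1, max r.2 last.2) :: accT) rest
        else rmLoop (r :: last :: accT) rest
      | [] => rmLoop [r] rest

def range_merge (ranges : List (Int × Int)) : List (Int × Int) :=
  rmLoop [] (PySem.List.sorted ranges (fun r => r.1) false)

-- the two-pointer while-loop of range_intersection (advancing an index = dropping a head)
def riLoop : List (Int × Int) → List (Int × Int) → List (Int × Int)
  | r1 :: t1, r2 :: t2 =>
    (max r1.1 r2.1, min r1.2 r2.2) ::
      (if r1.2 < r2.2 then riLoop t1 (r2 :: t2) else riLoop (r1 :: t1) t2)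
  | _, _ => []
termination_by l1 l2 => l1.length + l2.length

def range_intersection (ranges1 : List (Int × Int)) (ranges2 : List (Int × Int)) : List (Int × Int) :=
  range_merge (riLoop (PySem.List.sorted ranges1 (fun r => r.1) false)
                      (PySem.List.sorted ranges2 (fun r => r.1) false))

-- ===== PORT B =====
-- any(s <= x < e for s, e in rs)
def covB (x : Int) (rs : List (Int × Int)) : Bool :=
  rs.any (fun r => decide (r.1 ≤ x) && decide (x < r.2))

-- the two coordinate-collecting for-loops
def addCoords (cs : PySem.Set Int) (rs : List (Int × Int)) : PySem.Set Int :=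
  rs.foldl (fun cs r => if r.1 < r.2 then PySem.Set.add (PySem.Set.add cs r.1) r.2 else cs) cs

-- the sweep loop over consecutive-coordinate gaps, accumulator held reversed
def sweep (ranges1 ranges2 : List (Int × Int)) : List (Int × Int) → List (Int × Int) → List (Int × Int)
  | acc, [] => acc.reverse
  | acc, g :: rest =>
    if covB g.1 ranges1 && covB g.1 ranges2 then
      match acc with
      | last :: accT =>
        if last.2 = g.1 then sweep ranges1 ranges2 ((last.1, g.2) :: accT) rest
        else sweep ranges1 ranges2 (g :: last :: accT) rest
      | [] => sweep ranges1 ranges2 [g] rest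
    else sweep ranges1 ranges2 acc rest

def range_intersection_alt (ranges1 : List (Int × Int)) (ranges2 : List (Int × Int)) : List (Int × Int) :=
  let xs := PySem.List.sorted (addCoords (addCoords PySem.Set.empty ranges1) ranges2) (fun x => x) false
  sweep ranges1 ranges2 [] (xs.zip xs.tail)

-- ===== PRECONDITION & SPEC =====
def Spec_range_intersection (ranges1 : List (Int × Int)) (ranges2 : List (Int × Int)) (out : List (Int × Int)) : Prop := out = range_intersection_alt ranges1 ranges2
instance (ranges1 : List (Int × Int)) (ranges2 : List (Int × Int)) (out : List (Int × Int)) : Decidable (Spec_range_intersection ranges1 ranges2 out) := by unfold Spec_range_intersection; infer_instance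

-- ===== CLAIM (what is proved, stated in full; the proofs are below) =====
def Claim_equal_range_intersection : Prop := ∀ (ranges1 : List (Int × Int)) (ranges2 : List (Int × Int)), Dom_range_intersection ranges1 ranges2 → Spec_range_intersection ranges1 ranges2 (range_intersection ranges1 ranges2)

-- ===== LEMMAS AND PROOFS =====

-- p is covered by some (half-open) range of rs
def cov (p : Int) (rs : List (Int × Int)) : Prop := ∃ r ∈ rs, r.1 ≤ p ∧ p < r.2

-- normal form: nonempty intervals, strictly separated, sorted by start
def NF (l : List (Int × Int)) : Prop :=
  (∀ r ∈ l, r.1 < r.2) ∧ l.IsChain (fun a b => a.2 < b.1)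

theorem cov_nil (p : Int) : ¬ cov p [] := by simp [cov]

theorem cov_cons (p : Int) (r : Int × Int) (t : List (Int × Int)) :
    cov p (r :: t) ↔ (r.1 ≤ p ∧ p < r.2) ∨ cov p t := by
  simp [cov]

theorem cov_of_perm {p : Int} {l l' : List (Int × Int)} (h : l.Perm l') :
    cov p l ↔ cov p l' := by
  unfold cov
  constructor <;> rintro ⟨r, hr, h1, h2⟩
  · exact ⟨r, h.mem_iff.mp hr, h1, h2⟩
  · exact ⟨r, h.mem_iff.mpr hr, h1, h2⟩

theorem nf_tail {a : Int × Int} {t : List (Int × Int)} (h : NF (a :: t)) : NF t := by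
  obtain ⟨h1, h2⟩ := h
  exact ⟨fun r hr => h1 r (List.mem_cons_of_mem a hr), (List.isChain_cons.mp h2).2⟩

theorem nf_head_lt : ∀ (t : List (Int × Int)) (a : Int × Int), NF (a :: t) →
    ∀ b ∈ t, a.2 < b.1 := by
  intro t
  induction t with
  | nil => intro a _ b hb; simp at hb
  | cons c t' ih =>
    intro a h b hb
    have hac : a.2 < c.1 := (List.isChain_cons_cons.mp h.2).1
    rcases List.mem_cons.mp hb with rfl | hb
    · exact hac
    · have hc2 : c.1 < c.2 := h.1 c (by simp)
      have := ih c (nf_tail h) b hb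
      omega

theorem cov_head_le {a : Int × Int} {t : List (Int × Int)} (h : NF (a :: t)) :
    ∀ p, cov p (a :: t) → a.1 ≤ p := by
  rintro p ⟨r, hr, h1, h2⟩
  rcases List.mem_cons.mp hr with rfl | hr
  · exact h1
  · have := nf_head_lt t a h r hr
    have := h.1 a (by simp)
    omega

theorem not_cov_end {a : Int × Int} {t : List (Int × Int)} (h : NF (a :: t)) :
    ¬ cov a.2 (a :: t) := by
  rintro ⟨r, hr, h1, h2⟩
  rcases List.mem_cons.mp hr with rfl | hr
  · omega
  · have := nf_head_lt t a h r hr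
    omega

-- uniqueness of normal form by coverage
theorem nf_ext : ∀ (l l' : List (Int × Int)), NF l → NF l' →
    (∀ p, cov p l ↔ cov p l') → l = l' := by
  intro l
  induction l with
  | nil =>
    intro l' _ h' hc
    cases l' with
    | nil => rfl
    | cons a' t' =>
      exfalso
      have : cov a'.1 (a' :: t') := ⟨a', by simp, le_refl _, h'.1 a' (by simp)⟩
      exact cov_nil a'.1 ((hc a'.1).mpr this)
  | cons a t ih =>
    intro l' h h' hc
    cases l' with
    | nil =>
      exfalso
      have : cov a.1 (a :: t) := ⟨a, by simp, le_refl _, h.1 a (by simp)⟩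
      exact cov_nil a.1 ((hc a.1).mp this)
    | cons a' t' =>
      have ha : a.1 < a.2 := h.1 a (by simp)
      have ha' : a'.1 < a'.2 := h'.1 a' (by simp)
      have hstart : a.1 = a'.1 := by
        have h1 : cov a.1 (a' :: t') := (hc a.1).mp ⟨a, by simp, le_refl _, ha⟩
        have h2 : cov a'.1 (a :: t) := (hc a'.1).mpr ⟨a', by simp, le_refl _, ha'⟩
        have := cov_head_le h' a.1 h1
        have := cov_head_le h a'.1 h2
        omega
      have hend : a.2 = a'.2 := by
        by_contra hne
        rcases lt_or_gt_of_ne hne with hlt | hgt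
        · exact not_cov_end h ((hc a.2).mpr ⟨a', by simp, by omega, by omega⟩)
        · exact not_cov_end h' ((hc a'.2).mp ⟨a, by simp, by omega, by omega⟩)
      have hgt_t : ∀ p, cov p t → a.2 < p := by
        rintro p ⟨r, hr, h1, h2⟩
        have := nf_head_lt t a h r hr
        omega
      have hgt_t' : ∀ p, cov p t' → a'.2 < p := by
        rintro p ⟨r, hr, h1, h2⟩
        have := nf_head_lt t' a' h' r hr
        omega
      have hct : ∀ p, cov p t ↔ cov p t' := by
        intro p
        constructor
        · intro hp
          have hgt := hgt_t p hp
          have : cov p (a' :: t') := (hc p).mp ((cov_cons p a t).mpr (Or.inr hp))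
          rcases (cov_cons p a' t').mp this with ⟨_, h2⟩ | hp'
          · omega
          · exact hp'
        · intro hp
          have hgt := hgt_t' p hp
          have : cov p (a :: t) := (hc p).mpr ((cov_cons p a' t').mpr (Or.inr hp))
          rcases (cov_cons p a t).mp this with ⟨_, h2⟩ | hp'
          · omega
          · exact hp'
      have : a = a' := Prod.ext hstart hend
      rw [this, ih t' (nf_tail h) (nf_tail h') hct]

-- ===== A side =====

theorem riLoop_cov_sub : ∀ (l1 l2 : List (Int × Int)) (p : Int),
    cov p (riLoop l1 l2) → cov p l1 ∧ cov p l2 := by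
  intro l1 l2
  fun_induction riLoop l1 l2 with
  | case1 r1 t1 r2 t2 ih1 ih2 =>
    intro p hp
    rcases (cov_cons p _ _).mp hp with ⟨h1, h2⟩ | hp'
    · simp only [sup_le_iff, lt_inf_iff] at h1 h2
      exact ⟨⟨r1, by simp, by omega, by omega⟩, ⟨r2, by simp, by omega, by omega⟩⟩
    · split at hp'
      · obtain ⟨hc1, hc2⟩ := ih1 p hp'
        exact ⟨(cov_cons p r1 t1).mpr (Or.inr hc1), hc2⟩
      · obtain ⟨hc1, hc2⟩ := ih2 p hp'
        exact ⟨hc1, (cov_cons p r2 t2).mpr (Or.inr hc2)⟩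
  | case2 => intro p hp; exact absurd hp (cov_nil p)

theorem riLoop_cov_sup : ∀ (l1 l2 : List (Int × Int)),
    l1.Pairwise (fun a b => a.1 ≤ b.1) → l2.Pairwise (fun a b => a.1 ≤ b.1) →
    ∀ p, cov p l1 → cov p l2 → cov p (riLoop l1 l2) := by
  intro l1 l2
  fun_induction riLoop l1 l2 with
  | case1 r1 t1 r2 t2 ih1 ih2 =>
    intro hp1 hp2 p hc1 hc2
    have hs1 : ∀ r ∈ r1 :: t1, r1.1 ≤ r.1 := by
      intro r hr
      rcases List.mem_cons.mp hr with rfl | hr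
      · exact le_refl _
      · exact (List.pairwise_cons.mp hp1).1 r hr
    have hs2 : ∀ r ∈ r2 :: t2, r2.1 ≤ r.1 := by
      intro r hr
      rcases List.mem_cons.mp hr with rfl | hr
      · exact le_refl _
      · exact (List.pairwise_cons.mp hp2).1 r hr
    obtain ⟨q1, hq1, ha1, hb1⟩ := hc1
    obtain ⟨q2, hq2, ha2, hb2⟩ := hc2
    have hq1s := hs1 q1 hq1
    have hq2s := hs2 q2 hq2
    by_cases hcmp : r1.2 < r2.2
    · rw [if_pos hcmp]
      rcases List.mem_cons.mp hq1 with rfl | hq1'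
      · refine (cov_cons p _ _).mpr (Or.inl ⟨?_, ?_⟩)
        · simp only [sup_le_iff]; omega
        · simp only [lt_inf_iff]; omega
      · exact (cov_cons p _ _).mpr (Or.inr
          (ih1 (List.pairwise_cons.mp hp1).2 hp2 p ⟨q1, hq1', ha1, hb1⟩ ⟨q2, hq2, ha2, hb2⟩))
    · rw [if_neg hcmp]
      rcases List.mem_cons.mp hq2 with rfl | hq2'
      · refine (cov_cons p _ _).mpr (Or.inl ⟨?_, ?_⟩)
        · simp only [sup_le_iff]; omega
        · simp only [lt_inf_iff]; omega
      · exact (cov_cons p _ _).mpr (Or.inr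
          (ih2 hp1 (List.pairwise_cons.mp hp2).2 p ⟨q1, hq1, ha1, hb1⟩ ⟨q2, hq2', ha2, hb2⟩))
  | case2 l1 l2 h =>
    intro _ _ p hc1 hc2
    exfalso
    cases l1 with
    | nil => exact cov_nil p hc1
    | cons a t1 =>
      cases l2 with
      | nil => exact cov_nil p hc2
      | cons b t2 => exact h a t1 b t2 rfl rfl

theorem rmLoop_spec : ∀ (rest acc : List (Int × Int)),
    rest.Pairwise (fun a b => a.1 ≤ b.1) →
    (∀ r ∈ acc, r.1 < r.2) → acc.IsChain (fun a b => b.2 < a.1) →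
    (∀ r ∈ rest, ∀ q ∈ acc, q.1 ≤ r.1) →
    NF (rmLoop acc rest) ∧ ∀ p, (cov p (rmLoop acc rest) ↔ cov p acc ∨ cov p rest) := by
  intro rest acc
  fun_induction rmLoop acc rest with
  | case1 acc =>
    intro _ hne hchain _
    refine ⟨⟨fun r hr => hne r (List.mem_reverse.mp hr), ?_⟩, ?_⟩
    · rw [List.isChain_reverse]
      exact hchain
    · intro p
      rw [cov_of_perm (List.reverse_perm acc)]
      simp [cov_nil]
  | case2 acc r rest h ih =>
    intro hsorted hne hchain hle
    obtain ⟨hNF, hcov⟩ := ih (List.pairwise_cons.mp hsorted).2 hne hchain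
      (fun r' hr' q hq => hle r' (List.mem_cons_of_mem r hr') q hq)
    refine ⟨hNF, fun p => (hcov p).trans ?_⟩
    rw [cov_cons]
    constructor
    · rintro (ha | hr); exacts [Or.inl ha, Or.inr (Or.inr hr)]
    · rintro (ha | ⟨h1, h2⟩ | hr)
      · exact Or.inl ha
      · omega
      · exact Or.inr hr
  | case3 r rest h last accT h2 ih =>
    intro hsorted hne hchain hle
    have hr12 : r.1 < r.2 := by omega
    have hlast : last.1 < last.2 := hne last (by simp)
    have hle_r : last.1 ≤ r.1 := hle r (by simp) last (by simp)
    obtain ⟨hNF, hcov⟩ := ih (List.pairwise_cons.mp hsorted).2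
      (by
        intro q hq
        rcases List.mem_cons.mp hq with rfl | hq
        · simp only []
          omega
        · exact hne q (List.mem_cons_of_mem last hq))
      (by
        rw [List.isChain_cons] at hchain ⊢
        exact ⟨hchain.1, hchain.2⟩)
      (by
        intro r' hr' q hq
        rcases List.mem_cons.mp hq with rfl | hq
        · exact hle r' (List.mem_cons_of_mem r hr') last (by simp)
        · exact hle r' (List.mem_cons_of_mem r hr') q (List.mem_cons_of_mem last hq))
    refine ⟨hNF, fun p => (hcov p).trans ?_⟩
    have key : (((last.1, max r.2 last.2) : Int × Int).1 ≤ p ∧ p < ((last.1, max r.2 last.2) : Int × Int).2) ↔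
        ((last.1 ≤ p ∧ p < last.2) ∨ (r.1 ≤ p ∧ p < r.2)) := by
      simp only [lt_sup_iff]
      omega
    rw [cov_cons, cov_cons, cov_cons, key]
    clear ih hNF hcov hsorted hne hchain hle
    generalize cov p accT = C
    generalize cov p rest = D
    tauto
  | case4 r rest h last accT h2 ih =>
    intro hsorted hne hchain hle
    have hr12 : r.1 < r.2 := by omega
    obtain ⟨hNF, hcov⟩ := ih (List.pairwise_cons.mp hsorted).2
      (by
        intro q hq
        rcases List.mem_cons.mp hq with rfl | hq
        · exact hr12
        · exact hne q hq)
      (by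
        rw [List.isChain_cons]
        refine ⟨?_, hchain⟩
        intro x hx
        simp only [List.head?_cons, Option.mem_def, Option.some.injEq] at hx
        subst hx
        omega)
      (by
        intro r' hr' q hq
        rcases List.mem_cons.mp hq with rfl | hq
        · exact (List.pairwise_cons.mp hsorted).1 r' hr'
        · exact hle r' (List.mem_cons_of_mem r hr') q hq)
    refine ⟨hNF, fun p => (hcov p).trans ?_⟩
    rw [cov_cons, cov_cons, cov_cons]
    clear ih hNF hcov hsorted hne hchain hle
    generalize cov p (last :: accT) = C
    generalize cov p rest = D
    tauto
  | case5 r rest h ih =>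
    intro hsorted _ _ _
    obtain ⟨hNF, hcov⟩ := ih (List.pairwise_cons.mp hsorted).2
      (by
        intro q hq
        rcases List.mem_cons.mp hq with rfl | hq
        · omega
        · simp at hq)
      (by simp)
      (by
        intro r' hr' q hq
        rcases List.mem_cons.mp hq with rfl | hq
        · exact (List.pairwise_cons.mp hsorted).1 r' hr'
        · simp at hq)
    refine ⟨hNF, fun p => (hcov p).trans ?_⟩
    rw [cov_cons, cov_cons]
    simp only [cov_nil, or_false, false_or]

theorem range_merge_spec (l : List (Int × Int)) :
    NF (range_merge l) ∧ ∀ p, (cov p (range_merge l) ↔ cov p l) := by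
  obtain ⟨hNF, hcov⟩ := rmLoop_spec (PySem.List.sorted l (fun r => r.1) false) []
    (PySem.List.sorted_pairwise l (fun r => r.1)) (by simp) (by simp) (by simp)
  refine ⟨hNF, fun p => (hcov p).trans ?_⟩
  rw [cov_of_perm (PySem.List.sorted_perm l (fun r => r.1) false)]
  simp [cov_nil]

theorem A_spec (ranges1 ranges2 : List (Int × Int)) :
    NF (range_intersection ranges1 ranges2) ∧
    ∀ p, (cov p (range_intersection ranges1 ranges2) ↔ cov p ranges1 ∧ cov p ranges2) := by
  obtain ⟨hNF, hcov⟩ := range_merge_spec (riLoop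
    (PySem.List.sorted ranges1 (fun r => r.1) false)
    (PySem.List.sorted ranges2 (fun r => r.1) false))
  refine ⟨hNF, fun p => (hcov p).trans ?_⟩
  constructor
  · intro h
    obtain ⟨h1, h2⟩ := riLoop_cov_sub _ _ p h
    rw [cov_of_perm (PySem.List.sorted_perm ranges1 (fun r => r.1) false)] at h1
    rw [cov_of_perm (PySem.List.sorted_perm ranges2 (fun r => r.1) false)] at h2
    exact ⟨h1, h2⟩
  · rintro ⟨h1, h2⟩
    rw [← cov_of_perm (PySem.List.sorted_perm ranges1 (fun r => r.1) false)] at h1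
    rw [← cov_of_perm (PySem.List.sorted_perm ranges2 (fun r => r.1) false)] at h2
    exact riLoop_cov_sup _ _ (PySem.List.sorted_pairwise ranges1 (fun r => r.1))
      (PySem.List.sorted_pairwise ranges2 (fun r => r.1)) p h1 h2

-- ===== B side =====

theorem covB_iff (x : Int) (rs : List (Int × Int)) : covB x rs = true ↔ cov x rs := by
  simp [covB, cov, List.any_eq_true]

theorem mem_addCoords (z : Int) (cs : PySem.Set Int) (rs : List (Int × Int)) :
    z ∈ addCoords cs rs ↔ z ∈ cs ∨ ∃ r ∈ rs, r.1 < r.2 ∧ (z = r.1 ∨ z = r.2) := by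
  induction rs generalizing cs with
  | nil => simp [addCoords]
  | cons r t ih =>
    show z ∈ addCoords (if r.1 < r.2 then _ else _) t ↔ _
    split_ifs with hr
    · rw [ih]
      simp only [PySem.Set.mem_add, List.mem_cons]
      constructor
      · rintro (((h | h) | h) | h)
        · exact Or.inl h
        · exact Or.inr ⟨r, Or.inl rfl, hr, Or.inl h⟩
        · exact Or.inr ⟨r, Or.inl rfl, hr, Or.inr h⟩
        · obtain ⟨q, hq, h1, h2⟩ := h
          exact Or.inr ⟨q, Or.inr hq, h1, h2⟩
      · rintro (h | ⟨q, (rfl | hq), h1, h2⟩)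
        · exact Or.inl (Or.inl (Or.inl h))
        · rcases h2 with rfl | rfl
          · exact Or.inl (Or.inl (Or.inr rfl))
          · exact Or.inl (Or.inr rfl)
        · exact Or.inr ⟨q, hq, h1, h2⟩
    · rw [ih]
      constructor
      · rintro (h | ⟨q, hq, h1, h2⟩)
        · exact Or.inl h
        · exact Or.inr ⟨q, List.mem_cons_of_mem r hq, h1, h2⟩
      · rintro (h | ⟨q, hq, h1, h2⟩)
        · exact Or.inl h
        · rcases List.mem_cons.mp hq with rfl | hq
          · omega
          · exact Or.inr ⟨q, hq, h1, h2⟩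

theorem nodup_addCoords (cs : PySem.Set Int) (rs : List (Int × Int)) (h : cs.Nodup) :
    (addCoords cs rs).Nodup := by
  induction rs generalizing cs with
  | nil => exact h
  | cons r t ih =>
    show ((addCoords (if r.1 < r.2 then _ else _) t)).Nodup
    split_ifs with hr
    · exact ih _ (PySem.Set.nodup_add _ _ (PySem.Set.nodup_add _ _ h))
    · exact ih _ h

-- a pair of the consecutive-pairs list, in a strictly increasing list
theorem consec_spec : ∀ (xs : List Int), xs.Pairwise (· < ·) →
    ∀ x y, (x, y) ∈ xs.zip xs.tail → x < y ∧ ∀ z ∈ xs, z ≤ x ∨ y ≤ z := by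
  intro xs
  induction xs with
  | nil => intro _ x y h; simp at h
  | cons a rest ih =>
    intro hp x y hm
    cases rest with
    | nil => simp at hm
    | cons b t =>
      have hzip : (a :: b :: t).zip (a :: b :: t).tail = (a, b) :: (b :: t).zip t := by
        simp [List.zip]
      rw [hzip] at hm
      rcases List.mem_cons.mp hm with heq | hm2
      · simp only [Prod.mk.injEq] at heq
        obtain ⟨h1, h2⟩ := heq
        subst h1
        subst h2
        refine ⟨(List.pairwise_cons.mp hp).1 y (by simp), ?_⟩
        intro z hz
        rcases List.mem_cons.mp hz with h | hz
        · exact Or.inl (le_of_eq h)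
        · rcases List.mem_cons.mp hz with h | hz
          · exact Or.inr (le_of_eq h.symm)
          · exact Or.inr (le_of_lt ((List.pairwise_cons.mp (List.pairwise_cons.mp hp).2).1 z hz))
      · obtain ⟨hxy, hall⟩ := ih (List.pairwise_cons.mp hp).2 x y hm2
        refine ⟨hxy, ?_⟩
        intro z hz
        rcases List.mem_cons.mp hz with h | hz
        · have hxmem : x ∈ b :: t := (List.of_mem_zip hm2).1
          have := (List.pairwise_cons.mp hp).1 x hxmem
          exact Or.inl (by omega)
        · exact hall z hz

theorem find_gap : ∀ (xs : List Int), xs.Pairwise (· < ·) →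
    ∀ (a b p : Int), a ∈ xs → b ∈ xs → a ≤ p → p < b →
    ∃ x y, (x, y) ∈ xs.zip xs.tail ∧ x ≤ p ∧ p < y := by
  intro xs
  induction xs with
  | nil => intro _ a b p ha; simp at ha
  | cons c rest ih =>
    intro hp a b p ha hb hap hpb
    cases rest with
    | nil =>
      simp at ha hb
      omega
    | cons d t =>
      have hzip : (c :: d :: t).zip (c :: d :: t).tail = (c, d) :: (d :: t).zip t := by
        simp [List.zip]
      by_cases hpd : p < d
      · refine ⟨c, d, by rw [hzip]; exact List.mem_cons_self .., ?_, hpd⟩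
        rcases List.mem_cons.mp ha with rfl | ha
        · exact hap
        · have : d ≤ a := by
            rcases List.mem_cons.mp ha with rfl | ha
            · exact le_refl a
            · exact le_of_lt ((List.pairwise_cons.mp (List.pairwise_cons.mp hp).2).1 a ha)
          omega
      · rw [not_lt] at hpd
        have hbmem : b ∈ d :: t := by
          rcases List.mem_cons.mp hb with rfl | hb
          · exfalso
            have := (List.pairwise_cons.mp hp).1 d (by simp)
            omega
          · exact hb
        obtain ⟨x, y, hm, hx, hy⟩ :=
          ih (List.pairwise_cons.mp hp).2 d b p (by simp) hbmem hpd hpb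
        exact ⟨x, y, by rw [hzip]; exact List.mem_cons_of_mem _ hm, hx, hy⟩

theorem sweep_spec (ranges1 ranges2 : List (Int × Int)) :
    ∀ (gaps acc : List (Int × Int)),
    (∀ g ∈ gaps, g.1 < g.2) → gaps.Pairwise (fun g h => g.2 ≤ h.1) →
    (∀ r ∈ acc, r.1 < r.2) → acc.IsChain (fun a b => b.2 < a.1) →
    (∀ g ∈ gaps, ∀ q ∈ acc, q.2 ≤ g.1) →
    NF (sweep ranges1 ranges2 acc gaps) ∧
    ∀ p, (cov p (sweep ranges1 ranges2 acc gaps) ↔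
      cov p acc ∨ ∃ g ∈ gaps, (covB g.1 ranges1 && covB g.1 ranges2) = true ∧ g.1 ≤ p ∧ p < g.2) := by
  intro gaps acc
  fun_induction sweep ranges1 ranges2 acc gaps with
  | case1 acc =>
    intro _ _ hne hchain _
    refine ⟨⟨fun r hr => hne r (List.mem_reverse.mp hr), ?_⟩, ?_⟩
    · rw [List.isChain_reverse]
      exact hchain
    · intro p
      rw [cov_of_perm (List.reverse_perm acc)]
      simp
  | case2 g rest hsel last accT h2 ih =>
    intro hg hgp hne hchain hle
    have hg12 : g.1 < g.2 := hg g (by simp)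
    have hlast : last.1 < last.2 := hne last (by simp)
    obtain ⟨hNF, hcov⟩ := ih (fun g' hg' => hg g' (List.mem_cons_of_mem g hg'))
      (List.pairwise_cons.mp hgp).2
      (by
        intro q hq
        rcases List.mem_cons.mp hq with rfl | hq
        · simp only []
          omega
        · exact hne q (List.mem_cons_of_mem last hq))
      (by
        rw [List.isChain_cons] at hchain ⊢
        exact ⟨hchain.1, hchain.2⟩)
      (by
        intro g' hg' q hq
        rcases List.mem_cons.mp hq with rfl | hq
        · exact (List.pairwise_cons.mp hgp).1 g' hg'
        · exact hle g' (List.mem_cons_of_mem g hg') q (List.mem_cons_of_mem last hq))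
    refine ⟨hNF, fun p => (hcov p).trans ?_⟩
    have key : (((last.1, g.2) : Int × Int).1 ≤ p ∧ p < ((last.1, g.2) : Int × Int).2) ↔
        ((last.1 ≤ p ∧ p < last.2) ∨ (g.1 ≤ p ∧ p < g.2)) := by
      simp only []
      omega
    rw [cov_cons, cov_cons, key, List.exists_mem_cons_iff]
    have hsel' : ((covB g.1 ranges1 && covB g.1 ranges2) = true ∧ g.1 ≤ p ∧ p < g.2) ↔ (g.1 ≤ p ∧ p < g.2) := by
      simp [hsel]
    rw [hsel']
    clear ih hNF hcov hgp hne hchain hle hg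
    generalize cov p accT = C
    generalize (∃ g' ∈ rest, (covB g'.1 ranges1 && covB g'.1 ranges2) = true ∧ g'.1 ≤ p ∧ p < g'.2) = E
    tauto
  | case3 g rest hsel last accT h2 ih =>
    intro hg hgp hne hchain hle
    have hg12 : g.1 < g.2 := hg g (by simp)
    have hlt : last.2 < g.1 := by
      have := hle g (by simp) last (by simp)
      omega
    obtain ⟨hNF, hcov⟩ := ih (fun g' hg' => hg g' (List.mem_cons_of_mem g hg'))
      (List.pairwise_cons.mp hgp).2
      (by
        intro q hq
        rcases List.mem_cons.mp hq with rfl | hq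
        · exact hg12
        · exact hne q hq)
      (by
        rw [List.isChain_cons]
        refine ⟨?_, hchain⟩
        intro x hx
        simp only [List.head?_cons, Option.mem_def, Option.some.injEq] at hx
        subst hx
        omega)
      (by
        intro g' hg' q hq
        rcases List.mem_cons.mp hq with rfl | hq
        · exact (List.pairwise_cons.mp hgp).1 g' hg'
        · exact hle g' (List.mem_cons_of_mem g hg') q hq)
    refine ⟨hNF, fun p => (hcov p).trans ?_⟩
    rw [cov_cons, cov_cons, List.exists_mem_cons_iff]
    have hsel' : ((covB g.1 ranges1 && covB g.1 ranges2) = true ∧ g.1 ≤ p ∧ p < g.2) ↔ (g.1 ≤ p ∧ p < g.2) := by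
      simp [hsel]
    rw [hsel']
    clear ih hNF hcov hgp hne hchain hle hg
    generalize cov p accT = C
    generalize (∃ g' ∈ rest, (covB g'.1 ranges1 && covB g'.1 ranges2) = true ∧ g'.1 ≤ p ∧ p < g'.2) = E
    generalize (last.1 ≤ p ∧ p < last.2) = L
    tauto
  | case4 g rest hsel ih =>
    intro hg hgp _ _ _
    have hg12 : g.1 < g.2 := hg g (by simp)
    obtain ⟨hNF, hcov⟩ := ih (fun g' hg' => hg g' (List.mem_cons_of_mem g hg'))
      (List.pairwise_cons.mp hgp).2
      (by
        intro q hq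
        rcases List.mem_cons.mp hq with rfl | hq
        · exact hg12
        · simp at hq)
      (by simp)
      (by
        intro g' hg' q hq
        rcases List.mem_cons.mp hq with rfl | hq
        · exact (List.pairwise_cons.mp hgp).1 g' hg'
        · simp at hq)
    refine ⟨hNF, fun p => (hcov p).trans ?_⟩
    rw [cov_cons, List.exists_mem_cons_iff]
    have hsel' : ((covB g.1 ranges1 && covB g.1 ranges2) = true ∧ g.1 ≤ p ∧ p < g.2) ↔ (g.1 ≤ p ∧ p < g.2) := by
      simp [hsel]
    rw [hsel']
    simp [cov_nil]
  | case5 acc g rest hsel ih =>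
    intro hg hgp hne hchain hle
    obtain ⟨hNF, hcov⟩ := ih (fun g' hg' => hg g' (List.mem_cons_of_mem g hg'))
      (List.pairwise_cons.mp hgp).2 hne hchain
      (fun g' hg' q hq => hle g' (List.mem_cons_of_mem g hg') q hq)
    refine ⟨hNF, fun p => (hcov p).trans ?_⟩
    rw [List.exists_mem_cons_iff]
    have hsel' : ¬ ((covB g.1 ranges1 && covB g.1 ranges2) = true ∧ g.1 ≤ p ∧ p < g.2) := by
      simp only [Bool.not_eq_true] at hsel
      simp [hsel]
    clear ih hNF hcov hgp hne hchain hle hg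
    generalize cov p acc = C
    generalize (∃ g' ∈ rest, (covB g'.1 ranges1 && covB g'.1 ranges2) = true ∧ g'.1 ≤ p ∧ p < g'.2) = E
    tauto

theorem zip_tail_pairwise : ∀ (xs : List Int), xs.Pairwise (· < ·) →
    (xs.zip xs.tail).Pairwise (fun g h => g.2 ≤ h.1) := by
  intro xs
  induction xs with
  | nil => intro _; simp
  | cons a rest ih =>
    intro hp
    cases rest with
    | nil => simp
    | cons b t =>
      have hzip : (a :: b :: t).zip (a :: b :: t).tail = (a, b) :: (b :: t).zip t := by
        simp [List.zip]
      rw [hzip]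
      refine List.pairwise_cons.mpr ⟨?_, ih (List.pairwise_cons.mp hp).2⟩
      intro g hg
      have hmem : g.1 ∈ b :: t := (List.of_mem_zip hg).1
      rcases List.mem_cons.mp hmem with h | h
      · omega
      · have := (List.pairwise_cons.mp (List.pairwise_cons.mp hp).2).1 g.1 h
        omega

theorem gap_const (xs : List Int) (hpw : xs.Pairwise (· < ·)) (rs : List (Int × Int))
    (hend : ∀ r ∈ rs, r.1 < r.2 → r.1 ∈ xs ∧ r.2 ∈ xs)
    (x y : Int) (hm : (x, y) ∈ xs.zip xs.tail) (p : Int) (hx : x ≤ p) (hy : p < y) :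
    cov p rs ↔ cov x rs := by
  obtain ⟨hxy, hsep⟩ := consec_spec xs hpw x y hm
  constructor
  · rintro ⟨r, hr, h1, h2⟩
    obtain ⟨he1, he2⟩ := hend r hr (by omega)
    refine ⟨r, hr, ?_, ?_⟩
    · rcases hsep r.1 he1 with h | h <;> omega
    · rcases hsep r.2 he2 with h | h <;> omega
  · rintro ⟨r, hr, h1, h2⟩
    obtain ⟨he1, he2⟩ := hend r hr (by omega)
    refine ⟨r, hr, by omega, ?_⟩
    rcases hsep r.2 he2 with h | h <;> omega

theorem pairwise_lt_sorted_coords (S : List Int) (hnd : S.Nodup) :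
    (PySem.List.sorted S (fun x => x) false).Pairwise (· < ·) := by
  have hle := PySem.List.sorted_pairwise S (fun x => x)
  have hnd' : (PySem.List.sorted S (fun x => x) false).Nodup :=
    ((PySem.List.sorted_perm S (fun x => x) false).nodup_iff).mpr hnd
  exact (hle.and hnd').imp (fun h => lt_of_le_of_ne h.1 h.2)

theorem B_spec (ranges1 ranges2 : List (Int × Int)) :
    NF (range_intersection_alt ranges1 ranges2) ∧
    ∀ p, (cov p (range_intersection_alt ranges1 ranges2) ↔ cov p ranges1 ∧ cov p ranges2) := by
  have hmemS : ∀ z, z ∈ addCoords (addCoords PySem.Set.empty ranges1) ranges2 ↔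
      (∃ r ∈ ranges1, r.1 < r.2 ∧ (z = r.1 ∨ z = r.2)) ∨
      (∃ r ∈ ranges2, r.1 < r.2 ∧ (z = r.1 ∨ z = r.2)) := by
    intro z
    rw [mem_addCoords, mem_addCoords]
    simp [PySem.Set.empty]
  have hnd : (addCoords (addCoords PySem.Set.empty ranges1) ranges2).Nodup :=
    nodup_addCoords _ _ (nodup_addCoords _ _ List.nodup_nil)
  have hpw := pairwise_lt_sorted_coords _ hnd
  set xs := PySem.List.sorted (addCoords (addCoords PySem.Set.empty ranges1) ranges2)
    (fun x => x) false with hxs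
  have hmem : ∀ z, z ∈ xs ↔
      (∃ r ∈ ranges1, r.1 < r.2 ∧ (z = r.1 ∨ z = r.2)) ∨
      (∃ r ∈ ranges2, r.1 < r.2 ∧ (z = r.1 ∨ z = r.2)) := by
    intro z
    rw [hxs, PySem.List.mem_sorted]
    exact hmemS z
  have hend1 : ∀ r ∈ ranges1, r.1 < r.2 → r.1 ∈ xs ∧ r.2 ∈ xs := by
    intro r hr h12
    exact ⟨(hmem r.1).mpr (Or.inl ⟨r, hr, h12, Or.inl rfl⟩),
           (hmem r.2).mpr (Or.inl ⟨r, hr, h12, Or.inr rfl⟩)⟩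
  have hend2 : ∀ r ∈ ranges2, r.1 < r.2 → r.1 ∈ xs ∧ r.2 ∈ xs := by
    intro r hr h12
    exact ⟨(hmem r.1).mpr (Or.inr ⟨r, hr, h12, Or.inl rfl⟩),
           (hmem r.2).mpr (Or.inr ⟨r, hr, h12, Or.inr rfl⟩)⟩
  have hgaps1 : ∀ g ∈ xs.zip xs.tail, g.1 < g.2 := by
    intro g hg
    exact (consec_spec xs hpw g.1 g.2 (by simpa using hg)).1
  obtain ⟨hNF, hcov⟩ := sweep_spec ranges1 ranges2 (xs.zip xs.tail) []
    hgaps1 (zip_tail_pairwise xs hpw) (by simp) (by simp) (by simp)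
  have halt : range_intersection_alt ranges1 ranges2 = sweep ranges1 ranges2 [] (xs.zip xs.tail) := rfl
  refine ⟨by rw [halt]; exact hNF, ?_⟩
  intro p
  rw [halt, hcov p]
  simp only [cov_nil, false_or]
  constructor
  · rintro ⟨g, hg, hsel, hp1, hp2⟩
    rw [Bool.and_eq_true, covB_iff, covB_iff] at hsel
    have hc1 := (gap_const xs hpw ranges1 hend1 g.1 g.2 (by simpa using hg) p hp1 hp2).mpr hsel.1
    have hc2 := (gap_const xs hpw ranges2 hend2 g.1 g.2 (by simpa using hg) p hp1 hp2).mpr hsel.2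
    exact ⟨hc1, hc2⟩
  · rintro ⟨⟨r, hr, h1, h2⟩, hc2⟩
    obtain ⟨he1, he2⟩ := hend1 r hr (by omega)
    obtain ⟨x, y, hm, hx, hy⟩ := find_gap xs hpw r.1 r.2 p he1 he2 h1 h2
    refine ⟨(x, y), by simpa using hm, ?_, hx, hy⟩
    rw [Bool.and_eq_true, covB_iff, covB_iff]
    constructor
    · exact (gap_const xs hpw ranges1 hend1 x y hm p hx hy).mp ⟨r, hr, h1, h2⟩
    · exact (gap_const xs hpw ranges2 hend2 x y hm p hx hy).mp hc2

-- ===== VERDICT (by name: the statement is the Claim_ definition above) =====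
theorem range_intersection_spec : Claim_equal_range_intersection := by
  intro ranges1 ranges2 _
  unfold Spec_range_intersection
  obtain ⟨hA, hcA⟩ := A_spec ranges1 ranges2
  obtain ⟨hB, hcB⟩ := B_spec ranges1 ranges2
  exact nf_ext _ _ hA hB (fun p => (hcA p).trans (hcB p).symm)
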